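-- pv_equiv track=rewrite | github.com/Chidt12/discreteMath | Bai3_Searching_on_graph/bai3_test.py | list_incident
-- ===== SOURCE A (Python) =====
-- def list_incident(word_index, array_words):
--     array = []
--     word = array_words[word_index]
--     for w_index in range(len(array_words)):
--         w = array_words[w_index]
--         if w_index != word_index:
--             cnt = 0
--             for i in range(len(word)):
--                 if i != 0 and word[i] in w:
--                     if word[1:].count(word[i]) <= w.count(word[i]):
--                         cnt += 1
--             if cnt == 4:
--                 array.append(w_index)
--     return array
-- ===== SOURCE B (Python) =====
-- def list_incident(word_index, array_words):
--     word = array_words[word_index]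
--     tail = sorted(word[1:])
--     result = []
--     for idx in range(len(array_words)):
--         if idx == word_index:
--             continue
--         sw = sorted(array_words[idx])
--         cnt = 0
--         i = 0
--         j = 0
--         n = len(tail)
--         ns = len(sw)
--         while i < n:
--             c = tail[i]
--             m = 0
--             while i < n and tail[i] == c:
--                 i += 1
--                 m += 1
--             while j < ns and sw[j] < c:
--                 j += 1
--             k = 0
--             while j < ns and sw[j] == c:
--                 j += 1
--                 k += 1
--             if m <= k:
--                 cnt += m
--         if cnt == 4:
--             result.append(idx)
--     return result
-- ===== Notes on version B (the rewrite author's own statement) =====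
-- stated objective: alternative
-- what changed: A scans every position of the word and rescans both strings with .count at each position; B sorts word[1:] and each candidate word once and computes the covered-letter count by a single two-pointer merge over the two sorted character lists (run-length comparison), with no counting scans at all.
import Mathlib
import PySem

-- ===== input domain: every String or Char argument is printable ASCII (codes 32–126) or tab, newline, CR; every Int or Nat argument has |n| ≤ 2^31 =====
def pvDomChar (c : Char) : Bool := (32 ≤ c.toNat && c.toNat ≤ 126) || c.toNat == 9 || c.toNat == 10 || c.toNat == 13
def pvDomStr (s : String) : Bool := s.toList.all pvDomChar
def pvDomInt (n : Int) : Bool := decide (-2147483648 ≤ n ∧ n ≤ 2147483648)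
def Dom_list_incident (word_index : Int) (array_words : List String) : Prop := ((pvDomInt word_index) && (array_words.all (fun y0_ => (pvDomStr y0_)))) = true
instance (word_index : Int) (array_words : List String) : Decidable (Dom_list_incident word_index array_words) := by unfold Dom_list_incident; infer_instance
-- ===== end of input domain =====

-- B replaces A's position-by-position inner loop (each position rescanning both strings with .count)
-- by sorting word[1:] and each candidate once and merging the two sorted character lists with two
-- pointers, comparing run lengths; objective: alternative.

-- ===== PORT A =====
def list_incident (word_index : Int) (array_words : List String) : List Int :=
  match PySem.List.pyGet? array_words word_index with
  | none => []  -- array_words[word_index] raises IndexError: excluded by Pre_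
  | some word =>
    let wl := word.toList
    (PySem.List.pyRange 0 (PySem.List.len array_words)).foldl
      (fun array w_index =>
        let w := (PySem.List.pyGetD array_words w_index "").toList
        if w_index ≠ word_index then
          let cnt : Int :=
            (PySem.List.pyRange 0 (PySem.List.len wl)).foldl
              (fun cnt i =>
                if i ≠ 0 ∧ PySem.Chars.isIn [PySem.List.pyGetD wl i ' '] w = true then
                  if PySem.Chars.count (PySem.List.slice wl (some 1) none) [PySem.List.pyGetD wl i ' ']
                       ≤ PySem.Chars.count w [PySem.List.pyGetD wl i ' '] then cnt + 1 else cnt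
                else cnt) 0
          if cnt = 4 then array ++ [w_index] else array
        else array) []

-- ===== PORT B =====
-- Inner while-merge of Source B: both lists sorted; take the run of the current letter in the
-- tail, advance in the candidate past smaller letters, take the matching run, compare lengths.
def mergeCnt : List Char → List Char → Int
  | [], _ => 0
  | c :: t, s =>
    let m : Nat := 1 + (t.takeWhile (fun x => x == c)).length
    let rest := t.dropWhile (fun x => x == c)
    let s1 := s.dropWhile (fun x => decide (x < c))
    let k : Nat := (s1.takeWhile (fun x => x == c)).length
    let s2 := s1.dropWhile (fun x => x == c)
    (if m ≤ k then (m : Int) else 0) + mergeCnt rest s2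
termination_by t _ => t.length
decreasing_by
  simpa using Nat.lt_succ_of_le (List.Sublist.length_le (List.dropWhile_sublist _))

def list_incident_alt (word_index : Int) (array_words : List String) : List Int :=
  match PySem.List.pyGet? array_words word_index with
  | none => []  -- array_words[word_index] raises IndexError: excluded by Pre_
  | some word =>
    let tail := PySem.List.sorted (PySem.List.slice word.toList (some 1) none) (fun c => c) false
    (PySem.List.pyRange 0 (PySem.List.len array_words)).foldl
      (fun result idx =>
        if idx = word_index then result
        else
          let sw := PySem.List.sorted (PySem.List.pyGetD array_words idx "").toList (fun c => c) false
          let cnt : Int := mergeCnt tail sw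
          if cnt = 4 then result ++ [idx] else result) []

-- ===== PRECONDITION & SPEC =====
-- Pre_ excludes exactly the inputs where `array_words[word_index]` raises IndexError in Python A.
def Pre_list_incident (word_index : Int) (array_words : List String) : Prop :=
  PySem.Raise.InRange array_words.length word_index
instance (word_index : Int) (array_words : List String) : Decidable (Pre_list_incident word_index array_words) := by unfold Pre_list_incident; infer_instance
def pvWitness_list_incident : Int × List String := (0, ["stone", "notes", "onset"])

def Spec_list_incident (word_index : Int) (array_words : List String) (out : List Int) : Prop := out = list_incident_alt word_index array_words
instance (word_index : Int) (array_words : List String) (out : List Int) : Decidable (Spec_list_incident word_index array_words out) := by unfold Spec_list_incident; infer_instance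

-- ===== CLAIM (what is proved, stated in full; the proofs are below) =====
def Claim_equal_list_incident : Prop := ∀ (word_index : Int) (array_words : List String), Dom_list_incident word_index array_words → Pre_list_incident word_index array_words → Spec_list_incident word_index array_words (list_incident word_index array_words)

-- ===== LEMMAS AND PROOFS =====

-- Python `s.count(c)` for a single character c is the character count.
lemma chars_count_go_singleton (c : Char) (l : List Char) (fuel acc : Nat) (h : l.length ≤ fuel) :
    PySem.Chars.count.go [c] fuel l acc = acc + l.count c := by
  induction l generalizing fuel acc with
  | nil => cases fuel <;> simp [PySem.Chars.count.go]
  | cons x t ih =>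
    cases fuel with
    | zero => simp at h
    | succ n =>
      simp only [PySem.Chars.count.go, List.isPrefixOf, List.length_cons] at *
      by_cases hx : x = c
      · subst hx
        rw [if_pos (by simp)]
        have hdrop : List.drop (([] : List Char).length + 1) (x :: t) = t := by simp
        rw [hdrop, ih _ _ (by omega)]
        simp; omega
      · rw [if_neg (by simp [beq_iff_eq]; exact fun hh => hx hh.symm), ih _ _ (by omega)]
        have hbc : (x == c) = false := beq_eq_false_iff_ne.mpr hx
        simp [List.count_cons, hbc]

lemma chars_count_single (l : List Char) (c : Char) :
    PySem.Chars.count l [c] = l.count c := by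
  simpa [PySem.Chars.count] using chars_count_go_singleton c l l.length 0 le_rfl

-- `c in w` for a single character means membership.
lemma isIn_singleton (c : Char) (w : List Char) :
    PySem.Chars.isIn [c] w = true ↔ c ∈ w := by
  rw [PySem.Chars.isIn_iff_infix, List.singleton_infix_iff]

-- elements surviving dropWhile (== c) in a sorted list whose elements are all ≥ c are > c
lemma mem_dropWhile_eq_gt (l : List Char) (c : Char) (hs : l.Pairwise (· ≤ ·))
    (hge : ∀ x ∈ l, c ≤ x) : ∀ x ∈ l.dropWhile (fun x => x == c), c < x := by
  induction l with
  | nil => simp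
  | cons a t ih =>
    by_cases ha : a = c
    · subst ha
      rw [List.dropWhile_cons_of_pos (by simp)]
      exact ih hs.of_cons (fun x hx => hge x (List.mem_cons_of_mem _ hx))
    · rw [List.dropWhile_cons_of_neg (by simpa using ha)]
      intro x hx
      have hac : c < a := lt_of_le_of_ne (hge a (List.mem_cons_self)) (Ne.symm ha)
      rcases List.mem_cons.mp hx with rfl | hx
      · exact hac
      · exact lt_of_lt_of_le hac ((List.pairwise_cons.mp hs).1 x hx)

-- elements surviving dropWhile (< c) in a sorted list are ≥ c
lemma mem_dropWhile_lt_ge (l : List Char) (c : Char) (hs : l.Pairwise (· ≤ ·)) :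
    ∀ x ∈ l.dropWhile (fun x => decide (x < c)), c ≤ x := by
  induction l with
  | nil => simp
  | cons a t ih =>
    by_cases ha : a < c
    · rw [List.dropWhile_cons_of_pos (by simpa using ha)]
      exact ih hs.of_cons
    · rw [List.dropWhile_cons_of_neg (by simpa using ha)]
      intro x hx
      have hca : c ≤ a := le_of_not_gt ha
      rcases List.mem_cons.mp hx with rfl | hx
      · exact hca
      · exact le_trans hca ((List.pairwise_cons.mp hs).1 x hx)

lemma countP_of_forall_eq (l : List Char) (c : Char) (p : Char → Bool)
    (h : ∀ x ∈ l, x = c) : l.countP p = if p c then l.length else 0 := by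
  induction l with
  | nil => simp
  | cons a t ih =>
    have ha : a = c := h a List.mem_cons_self
    subst ha
    rw [List.countP_cons, ih (fun x hx => h x (List.mem_cons_of_mem _ hx))]
    by_cases hp : p a <;> simp [hp]

lemma count_eq_zero_of_forall_gt (l : List Char) (c : Char) (h : ∀ x ∈ l, c < x) :
    l.count c = 0 := List.count_eq_zero.mpr (fun hc => lt_irrefl c (h c hc))

lemma count_eq_zero_of_forall_lt (l : List Char) (c : Char) (h : ∀ x ∈ l, x < c) :
    l.count c = 0 := List.count_eq_zero.mpr (fun hc => lt_irrefl c (h c hc))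

-- the merge over two sorted lists counts the positions of t whose letter's multiplicity is covered by s
lemma mergeCnt_sorted (t s : List Char) (ht : t.Pairwise (· ≤ ·)) (hs : s.Pairwise (· ≤ ·)) :
    mergeCnt t s = ((t.countP (fun c => decide (t.count c ≤ s.count c)) : Nat) : Int) := by
  induction t, s using mergeCnt.induct with
  | case1 s => simp [mergeCnt]
  | case2 c t s rest0 s10 s20 ih =>
    have hs20 : s20 = s10.dropWhile (fun x => x == c) := rfl
    have hs10 : s10 = s.dropWhile (fun x => decide (x < c)) := rfl
    have hrest0 : rest0 = t.dropWhile (fun x => x == c) := rfl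
    rw [hs20, hs10, hrest0] at ih
    rw [mergeCnt]
    set run := t.takeWhile (fun x => x == c) with hrun
    set rest := t.dropWhile (fun x => x == c) with hrest
    set s1 := s.dropWhile (fun x => decide (x < c)) with hs1
    set kr := s1.takeWhile (fun x => x == c) with hkr
    set s2 := s1.dropWhile (fun x => x == c) with hs2
    have htw : t = run ++ rest := (List.takeWhile_append_dropWhile).symm
    have hsw : s = s.takeWhile (fun x => decide (x < c)) ++ s1 := (List.takeWhile_append_dropWhile).symm
    have hs1w : s1 = kr ++ s2 := (List.takeWhile_append_dropWhile).symm
    -- membership facts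
    have hrun_eq : ∀ x ∈ run, x = c := fun x hx => by
      simpa using (List.mem_takeWhile_imp hx)
    have hct : ∀ x ∈ t, c ≤ x := (List.pairwise_cons.mp ht).1
    have hrest_gt : ∀ x ∈ rest, c < x := mem_dropWhile_eq_gt t c ht.of_cons hct
    have hs1_ge : ∀ x ∈ s1, c ≤ x := mem_dropWhile_lt_ge s c hs
    have hs1_sorted : s1.Pairwise (· ≤ ·) := hs.sublist (List.dropWhile_sublist _)
    have hkr_eq : ∀ x ∈ kr, x = c := fun x hx => by
      simpa using (List.mem_takeWhile_imp hx)
    have hs2_gt : ∀ x ∈ s2, c < x := mem_dropWhile_eq_gt s1 c hs1_sorted hs1_ge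
    have hslt : ∀ x ∈ s.takeWhile (fun x => decide (x < c)), x < c := fun x hx => by
      simpa using (List.mem_takeWhile_imp hx)
    -- counts of c
    have hcount_run : run.count c = run.length := List.count_eq_length.mpr (fun x hx => ((hrun_eq x hx).symm ▸ rfl))
    have hcount_kr : kr.count c = kr.length := List.count_eq_length.mpr (fun x hx => ((hkr_eq x hx).symm ▸ rfl))
    have hcount_t : (c :: t).count c = 1 + run.length := by
      rw [List.count_cons_self, htw, List.count_append, hcount_run,
        count_eq_zero_of_forall_gt rest c hrest_gt]
      omega
    have hcount_s : s.count c = kr.length := by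
      rw [hsw, List.count_append, count_eq_zero_of_forall_lt _ c hslt, hs1w, List.count_append,
        hcount_kr, count_eq_zero_of_forall_gt s2 c hs2_gt]
      omega
    -- counts of letters of rest are untouched
    have hcount_rest : ∀ x ∈ rest, (c :: t).count x = rest.count x := by
      intro x hx
      have hxc : c < x := hrest_gt x hx
      rw [List.count_cons_of_ne (ne_of_gt hxc).symm, htw, List.count_append,
        List.count_eq_zero.mpr (fun hcx => absurd (hrun_eq x hcx) (ne_of_gt hxc)), Nat.zero_add]
    have hcount_s2 : ∀ x ∈ rest, s.count x = s2.count x := by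
      intro x hx
      have hxc : c < x := hrest_gt x hx
      rw [hsw, List.count_append,
        List.count_eq_zero.mpr (fun hcx => absurd (hslt x hcx) (by simp [lt_asymm hxc])),
        hs1w, List.count_append,
        List.count_eq_zero.mpr (fun hcx => absurd (hkr_eq x hcx) (ne_of_gt hxc))]
      omega
    -- split the countP
    have hrest_sorted : rest.Pairwise (· ≤ ·) := ht.of_cons.sublist (List.dropWhile_sublist _)
    have hs2_sorted : s2.Pairwise (· ≤ ·) := hs1_sorted.sublist (List.dropWhile_sublist _)
    have hsplit : (c :: t).countP (fun x => decide ((c :: t).count x ≤ s.count x))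
        = (c :: run).countP (fun x => decide ((c :: t).count x ≤ s.count x))
          + rest.countP (fun x => decide ((c :: t).count x ≤ s.count x)) := by
      have : (c :: t) = (c :: run) ++ rest := by rw [List.cons_append, ← htw]
      rw [this, List.countP_append]
    rw [hsplit,
      countP_of_forall_eq (c :: run) c _ (by
        intro x hx
        rcases List.mem_cons.mp hx with rfl | hx
        · rfl
        · exact hrun_eq x hx),
      List.countP_congr (fun x hx => by
        rw [hcount_rest x hx, hcount_s2 x hx]),
      ih hrest_sorted hs2_sorted, hcount_t, hcount_s]
    simp only [List.length_cons, decide_eq_true_eq]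
    push_cast
    split_ifs <;> simp <;> omega

-- A's inner loop over positions equals B's two-pointer merge over the sorted letter lists
lemma cnt_eq (wl w : List Char) :
    (PySem.List.pyRange 0 (PySem.List.len wl)).foldl
      (fun cnt i =>
        if i ≠ 0 ∧ PySem.Chars.isIn [PySem.List.pyGetD wl i ' '] w = true then
          if PySem.Chars.count (PySem.List.slice wl (some 1) none) [PySem.List.pyGetD wl i ' ']
               ≤ PySem.Chars.count w [PySem.List.pyGetD wl i ' '] then cnt + 1 else cnt
        else cnt) (0 : Int)
    = mergeCnt (PySem.List.sorted (PySem.List.slice wl (some 1) none) (fun c => c) false)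
               (PySem.List.sorted w (fun c => c) false) := by
  rw [PySem.List.slice_from wl (by norm_num : (0:Int) ≤ 1)]
  simp only [Int.toNat_one, chars_count_single]
  have hpt : (PySem.List.sorted (List.drop 1 wl) (fun c : Char => c) false).Perm (List.drop 1 wl) :=
    PySem.List.sorted_perm _ _ _
  have hpw : (PySem.List.sorted w (fun c : Char => c) false).Perm w :=
    PySem.List.sorted_perm _ _ _
  rw [mergeCnt_sorted _ _ (PySem.List.sorted_pairwise _ _) (PySem.List.sorted_pairwise _ _)]
  rw [List.countP_congr (q := fun c => decide (List.count c (List.drop 1 wl) ≤ List.count c w))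
      (fun x _ => by rw [hpt.count_eq, hpw.count_eq]),
    hpt.countP_eq]
  by_cases hw : wl = []
  · subst hw; simp [PySem.List.pyRange, PySem.List.len]
  · have hlen : (0:Int) < PySem.List.len wl := by
      simp only [PySem.List.len]
      exact_mod_cast List.length_pos_of_ne_nil hw
    rw [PySem.List.pyRange_one_cons hlen, List.foldl_cons, if_neg (by simp),
        show ((0:Int)+1) = 1 by norm_num]
    rw [PySem.List.foldl_congr_mem (PySem.List.pyRange 1 (PySem.List.len wl)) _
        (fun cnt i => if PySem.Chars.isIn [PySem.List.pyGetD wl i ' '] w = true ∧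
            List.count (PySem.List.pyGetD wl i ' ') (List.drop 1 wl) ≤ List.count (PySem.List.pyGetD wl i ' ') w
          then cnt + 1 else cnt) 0
        (by
          intro acc x hx
          have hx1 : (1:Int) ≤ x := (PySem.List.mem_pyRange_one.mp hx).1
          have hx0 : x ≠ 0 := by omega
          simp only [hx0, ne_eq, not_false_eq_true, true_and]
          split_ifs <;> tauto)]
    rw [PySem.List.foldl_pyRange_pyGetD wl ' '
        (fun acc c => if PySem.Chars.isIn [c] w = true ∧
            List.count c (List.drop 1 wl) ≤ List.count c w then acc + 1 else acc) 0
        (by norm_num : (0:Int) ≤ 1)]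
    simp only [Int.toNat_one]
    rw [PySem.List.foldl_ite_add_one
        (p := fun c => PySem.Chars.isIn [c] w = true ∧
            List.count c (List.drop 1 wl) ≤ List.count c w) (List.drop 1 wl) 0, zero_add]
    rw [List.countP_congr (q := fun c => decide (List.count c (List.drop 1 wl) ≤ List.count c w)) (by
        intro x hx
        simp only [decide_eq_true_eq]
        constructor
        · exact fun h => h.2
        · intro h
          exact ⟨(isIn_singleton _ _).mpr
            (List.count_pos_iff.mp (lt_of_lt_of_le (List.count_pos_iff.mpr hx) h)), h⟩)]

-- ===== VERDICT (by name: the statement is the Claim_ definition above) =====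
theorem list_incident_spec : Claim_equal_list_incident := by
  intro word_index array_words _ _
  unfold Spec_list_incident list_incident list_incident_alt
  cases h : PySem.List.pyGet? array_words word_index with
  | none => rfl
  | some word =>
    simp only
    apply PySem.List.foldl_congr_mem
    intro acc idx _
    have hc := cnt_eq word.toList (PySem.List.pyGetD array_words idx "").toList
    by_cases hi : idx = word_index
    · simp [hi]
    · simp only [hi, ne_eq, not_false_eq_true, if_true, if_false]
      rw [hc]
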